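-- pv_equiv track=rewrite | github.com/matteosan1/AoC | 2024/22.py | price_timeline
-- ===== SOURCE A (Python) =====
-- from queue import deque
--
-- def nth_secret(secret_number, n=2000):
--     for i in range(n):
--         secret_number ^= (secret_number << 6) & 0xFFFFFF
--         secret_number ^= (secret_number >> 5) & 0xFFFFFF
--         secret_number ^= (secret_number << 11) & 0xFFFFFF
--     return secret_number
--
-- def price_timeline(secret, n=2000):
--     timeline = {}             # {delta-4-tuple: price} pairs
--     deltas = deque(maxlen=4)  # The 4 most recent price deltas
--     price = secret % 10       # Initial price
--     for _ in range(n):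
--         secret = nth_secret(secret, 1)
--         price, previous_price = secret % 10, price
--         deltas.append(price - previous_price)
--         D = tuple(deltas)
--         if len(D) == 4 and D not in timeline:
--             timeline[D] = price
--     return timeline
-- ===== SOURCE B (Python) =====
-- def nth_secret(secret_number, n=2000):
--     for i in range(n):
--         secret_number ^= (secret_number << 6) & 0xFFFFFF
--         secret_number ^= (secret_number >> 5) & 0xFFFFFF
--         secret_number ^= (secret_number << 11) & 0xFFFFFF
--     return secret_number
--
-- def price_timeline(secret, n=2000):
--     # Pass 1: generate the full price sequence.
--     prices = [secret % 10]
--     for _ in range(n):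
--         secret = nth_secret(secret, 1)
--         prices.append(secret % 10)
--     # Pass 2: the delta sequence.
--     deltas = [prices[i + 1] - prices[i] for i in range(len(prices) - 1)]
--     # Pass 3: scan 4-wide windows, first occurrence wins.
--     timeline = {}
--     for i in range(len(deltas) - 3):
--         w = tuple(deltas[i:i + 4])
--         if w not in timeline:
--             timeline[w] = prices[i + 4]
--     return timeline
-- ===== Notes on version B (the rewrite author's own statement) =====
-- stated objective: alternative
-- what changed: Replaces A's fused single loop with deque bookkeeping by three separate passes: generate the full price list, derive the delta list, then scan 4-wide windows by index with first-seen-wins insertion.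
import Mathlib
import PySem

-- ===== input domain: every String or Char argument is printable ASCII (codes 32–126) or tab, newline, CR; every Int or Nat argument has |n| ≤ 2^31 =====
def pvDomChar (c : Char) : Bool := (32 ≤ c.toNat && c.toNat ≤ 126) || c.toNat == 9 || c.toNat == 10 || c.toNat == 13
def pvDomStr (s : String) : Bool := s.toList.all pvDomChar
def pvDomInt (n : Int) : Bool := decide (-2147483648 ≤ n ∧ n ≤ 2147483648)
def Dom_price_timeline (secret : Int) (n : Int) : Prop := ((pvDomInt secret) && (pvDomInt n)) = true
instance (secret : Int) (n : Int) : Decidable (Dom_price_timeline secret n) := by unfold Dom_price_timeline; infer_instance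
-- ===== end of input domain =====

-- B replaces A's fused single loop (deque of the last 4 deltas) by three separate passes
-- (price list, delta list, indexed window scan); alternative decomposition, same O(n) cost.

-- ===== PORT A =====
-- shared module helper (used by both Python versions)
def nth_secret (secret_number : Int) (n : Int) : Int :=
  (PySem.List.pyRange 0 n 1).foldl (fun s _ =>
    let s := PySem.Int.bxor s (PySem.Int.band (s <<< 6) 0xFFFFFF)
    let s := PySem.Int.bxor s (PySem.Int.band (s >>> 5) 0xFFFFFF)
    let s := PySem.Int.bxor s (PySem.Int.band (s <<< 11) 0xFFFFFF)
    s) secret_number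

def price_timeline (secret : Int) (n : Int) : List (List Int × Int) :=
  let st := (PySem.List.pyRange 0 n 1).foldl
    (fun (st : Int × Int × List Int × PySem.Dict (List Int) Int) _ =>
      let s := nth_secret st.1 1
      let price := PySem.Int.mod s 10
      let previous_price := st.2.1
      -- deque(maxlen=4): append, dropping the leftmost element when full
      let deltas0 := st.2.2.1 ++ [price - previous_price]
      let deltas := if 4 < deltas0.length then deltas0.tail else deltas0
      let tl := st.2.2.2
      let tl := if deltas.length = 4 ∧ tl.contains deltas = false then tl.insert deltas price else tl
      (s, price, deltas, tl))
    (secret, PySem.Int.mod secret 10, ([] : List Int), (PySem.Dict.empty : PySem.Dict (List Int) Int))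
  st.2.2.2.items

-- ===== PORT B =====
def price_timeline_alt (secret : Int) (n : Int) : List (List Int × Int) :=
  -- Pass 1: generate the full price sequence
  let gen := (PySem.List.pyRange 0 n 1).foldl
    (fun (st : Int × List Int) _ =>
      let s := nth_secret st.1 1
      (s, st.2 ++ [PySem.Int.mod s 10]))
    (secret, [PySem.Int.mod secret 10])
  let prices := gen.2
  -- Pass 2: the delta sequence
  let deltas := (PySem.List.pyRange 0 (PySem.List.len prices - 1) 1).map
    (fun i => PySem.List.pyGetD prices (i + 1) 0 - PySem.List.pyGetD prices i 0)
  -- Pass 3: scan 4-wide windows, first occurrence wins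
  let timeline := (PySem.List.pyRange 0 (PySem.List.len deltas - 3) 1).foldl
    (fun (tl : PySem.Dict (List Int) Int) i =>
      let w := PySem.List.slice deltas (some i) (some (i + 4))
      if tl.contains w then tl else tl.insert w (PySem.List.pyGetD prices (i + 4) 0))
    PySem.Dict.empty
  timeline.items

-- ===== PRECONDITION & SPEC =====
def Spec_price_timeline (secret : Int) (n : Int) (out : List (List Int × Int)) : Prop := out = price_timeline_alt secret n
instance (secret : Int) (n : Int) (out : List (List Int × Int)) : Decidable (Spec_price_timeline secret n out) := by unfold Spec_price_timeline; infer_instance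

-- ===== CLAIM (what is proved, stated in full; the proofs are below) =====
def Claim_equal_price_timeline : Prop := ∀ (secret : Int) (n : Int), Dom_price_timeline secret n → Spec_price_timeline secret n (price_timeline secret n)

-- ===== LEMMAS AND PROOFS =====

-- the secret after k single steps
def pvIter (secret : Int) : Nat → Int
  | 0 => secret
  | k + 1 => nth_secret (pvIter secret k) 1

-- k-th price, k-th delta, window of four deltas starting at i
def pvP (secret : Int) (k : Nat) : Int := PySem.Int.mod (pvIter secret k) 10
def pvD (secret : Int) (i : Nat) : Int := pvP secret (i + 1) - pvP secret i
def pvW (secret : Int) (i : Nat) : List Int :=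
  [pvD secret i, pvD secret (i + 1), pvD secret (i + 2), pvD secret (i + 3)]

-- canonical timeline after m loop iterations
def pvTL (secret : Int) (m : Nat) : PySem.Dict (List Int) Int :=
  (List.range (m - 3)).foldl
    (fun tl i => if tl.contains (pvW secret i) then tl
                 else tl.insert (pvW secret i) (pvP secret (i + 4)))
    PySem.Dict.empty

lemma pvW_drop (secret : Int) (i : Nat) :
    ((List.range (i + 4)).map (pvD secret)).drop i = pvW secret i := by
  rw [List.range_add, List.map_append, List.drop_append_of_le_length (by simp)]
  simp [pvW, List.range_succ]

lemma pvW_window (secret : Int) (m i : Nat) (h : i + 4 ≤ m) :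
    (((List.range m).map (pvD secret)).drop i).take 4 = pvW secret i := by
  have hm : m = (i + 4) + (m - (i + 4)) := by omega
  rw [hm, List.range_add, List.map_append,
      List.drop_append_of_le_length (by simp), pvW_drop]
  have h4 : (pvW secret i).length = 4 := by simp [pvW]
  rw [← h4, List.take_left]

lemma pv_ds_step (secret : Int) (k : Nat) :
    (if 4 < ((((List.range k).map (pvD secret)).drop (k - 4)) ++ [pvD secret k]).length
     then ((((List.range k).map (pvD secret)).drop (k - 4)) ++ [pvD secret k]).tail
     else (((List.range k).map (pvD secret)).drop (k - 4)) ++ [pvD secret k])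
    = ((List.range (k + 1)).map (pvD secret)).drop (k + 1 - 4) := by
  have hM1 : (List.range (k + 1)).map (pvD secret)
      = (List.range k).map (pvD secret) ++ [pvD secret k] := by
    rw [List.range_succ, List.map_append]
    rfl
  have hlen : (((List.range k).map (pvD secret)).drop (k - 4)).length = k - (k - 4) := by simp
  rcases lt_or_ge k 4 with hk | hk
  · rw [if_neg (by simp [hlen]; omega), hM1]
    have h0 : k + 1 - 4 = 0 := by omega
    have h0' : k - 4 = 0 := by omega
    rw [h0, h0']
    simp
  · rw [if_pos (by simp [hlen]; omega),
        List.tail_append_of_ne_nil (by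
          intro h
          rw [← List.length_eq_zero_iff, hlen] at h
          omega),
        List.tail_drop, hM1,
        List.drop_append_of_le_length (by simp)]
    congr 2
    omega

lemma pv_tl_step (secret : Int) (k : Nat) :
    (if (((List.range (k + 1)).map (pvD secret)).drop (k + 1 - 4)).length = 4 ∧
        (pvTL secret k).contains (((List.range (k + 1)).map (pvD secret)).drop (k + 1 - 4)) = false
     then (pvTL secret k).insert (((List.range (k + 1)).map (pvD secret)).drop (k + 1 - 4))
            (PySem.Int.mod (nth_secret (pvIter secret k) 1) 10)
     else pvTL secret k)
    = pvTL secret (k + 1) := by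
  have hlen : (((List.range (k + 1)).map (pvD secret)).drop (k + 1 - 4)).length
      = (k + 1) - (k + 1 - 4) := by simp
  rcases lt_or_ge k 3 with hk | hk
  · rw [if_neg (by rw [hlen]; intro h; omega)]
    unfold pvTL
    have h0 : k + 1 - 3 = 0 := by omega
    have h0' : k - 3 = 0 := by omega
    rw [h0, h0']
  · have hw : ((List.range (k + 1)).map (pvD secret)).drop (k + 1 - 4) = pvW secret (k - 3) := by
      have h4 : k + 1 = (k - 3) + 4 := by omega
      have h4' : k + 1 - 4 = k - 3 := by omega
      rw [h4', h4, pvW_drop]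
    have hTL : pvTL secret (k + 1)
        = (if (pvTL secret k).contains (pvW secret (k - 3)) then pvTL secret k
           else (pvTL secret k).insert (pvW secret (k - 3)) (pvP secret ((k - 3) + 4))) := by
      unfold pvTL
      have h1 : k + 1 - 3 = (k - 3) + 1 := by omega
      rw [h1, List.range_succ, List.foldl_concat]
    rw [hw, hTL]
    have hP : pvP secret ((k - 3) + 4) = PySem.Int.mod (nth_secret (pvIter secret k) 1) 10 := by
      have : (k - 3) + 4 = k + 1 := by omega
      rw [this]
      rfl
    rw [hP]
    by_cases hc : (pvTL secret k).contains (pvW secret (k - 3))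
    · rw [if_pos hc, if_neg (by simp [hc])]
    · rw [if_neg hc, if_pos ⟨by simp [pvW], by simp [hc]⟩]

lemma A_loop (secret : Int) (m : Nat) :
    (List.range m).foldl
      (fun (st : Int × Int × List Int × PySem.Dict (List Int) Int) (_ : Nat) =>
        let s := nth_secret st.1 1
        let price := PySem.Int.mod s 10
        let previous_price := st.2.1
        let deltas0 := st.2.2.1 ++ [price - previous_price]
        let deltas := if 4 < deltas0.length then deltas0.tail else deltas0
        let tl := st.2.2.2
        let tl := if deltas.length = 4 ∧ tl.contains deltas = false then tl.insert deltas price else tl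
        (s, price, deltas, tl))
      (secret, PySem.Int.mod secret 10, ([] : List Int), PySem.Dict.empty)
    = (pvIter secret m, pvP secret m,
       ((List.range m).map (pvD secret)).drop (m - 4), pvTL secret m) := by
  induction m with
  | zero => simp [pvIter, pvP, pvTL]
  | succ k ih =>
    rw [List.range_succ, List.foldl_concat, ih]
    dsimp only
    rw [← List.range_succ,
        show PySem.Int.mod (nth_secret (pvIter secret k) 1) 10 - pvP secret k = pvD secret k from rfl,
        pv_ds_step, pv_tl_step]
    rfl

lemma B_prices (secret : Int) (m : Nat) :
    (List.range m).foldl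
      (fun (st : Int × List Int) (_ : Nat) =>
        let s := nth_secret st.1 1
        (s, st.2 ++ [PySem.Int.mod s 10]))
      (secret, [PySem.Int.mod secret 10])
    = (pvIter secret m, (List.range (m + 1)).map (pvP secret)) := by
  induction m with
  | zero => simp [pvIter, pvP, List.range_one]
  | succ k ih =>
    rw [List.range_succ, List.foldl_concat, ih]
    simp only [Prod.mk.injEq]
    constructor
    · rfl
    · have h : List.range (k + 1 + 1) = List.range (k + 1) ++ [k + 1] := List.range_succ
      rw [h, List.map_append]
      rfl

-- ===== VERDICT (by name: the statement is the Claim_ definition above) =====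
lemma pv_deltas_eq (secret : Int) (m : Nat) :
    ((List.range m).map (fun (k : Nat) =>
       PySem.List.pyGetD ((List.range (m + 1)).map (pvP secret)) ((k : Int) + 1) 0
       - PySem.List.pyGetD ((List.range (m + 1)).map (pvP secret)) (k : Int) 0))
    = (List.range m).map (pvD secret) := by
  apply List.map_congr_left
  intro k hk
  have hk' : k < m := List.mem_range.mp hk
  have h1 : ((k : Int) + 1) = ((k + 1 : Nat) : Int) := by push_cast; ring
  rw [h1, PySem.List.pyGetD_natCast, PySem.List.pyGetD_natCast,
      PySem.List.getD_map_range _ _ _ _ (by omega),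
      PySem.List.getD_map_range _ _ _ _ (by omega)]
  rfl

lemma pv_B_fold (secret : Int) (m : Nat) :
    (List.range (m - 3)).foldl
      (fun (tl : PySem.Dict (List Int) Int) (i : Nat) =>
        let w := PySem.List.slice ((List.range m).map (pvD secret)) (some (i : Int)) (some ((i : Int) + 4))
        if tl.contains w then tl
        else tl.insert w (PySem.List.pyGetD ((List.range (m + 1)).map (pvP secret)) ((i : Int) + 4) 0))
      PySem.Dict.empty
    = pvTL secret m := by
  unfold pvTL
  apply PySem.List.foldl_congr_mem
  intro tl i hi
  have hi' : i < m - 3 := List.mem_range.mp hi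
  have h4 : ((i : Int) + 4) = ((i + 4 : Nat) : Int) := by push_cast; ring
  have hw : PySem.List.slice ((List.range m).map (pvD secret)) (some (i : Int)) (some ((i + 4 : Nat) : Int))
      = pvW secret i := by
    rw [show ((i + 4 : Nat) : Int) = ((i : Nat) : Int) + ((4 : Nat) : Int) by push_cast; ring]
    rw [PySem.List.slice_natCast_add, pvW_window secret m i (by omega)]
  rw [h4, PySem.List.pyGetD_natCast, PySem.List.getD_map_range _ _ _ _ (by omega)]
  dsimp only
  rw [hw]

theorem price_timeline_spec : Claim_equal_price_timeline := by
  intro secret n _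
  unfold Spec_price_timeline price_timeline price_timeline_alt
  dsimp only
  rw [PySem.List.pyRange_one 0 n]
  simp only [zero_add, Int.sub_zero]
  rw [List.foldl_map, List.foldl_map, A_loop, B_prices]
  dsimp only
  -- lengths
  rw [PySem.List.len_eq, PySem.List.len_eq]
  have hlen1 : (((List.range (n.toNat + 1)).map (pvP secret)).length : Int) - 1 = (n.toNat : Int) := by
    simp
  rw [hlen1, PySem.List.pyRange_one 0 (n.toNat : Int)]
  simp only [zero_add, Int.sub_zero, Int.toNat_natCast]
  rw [List.map_map]
  rw [show ((fun i => PySem.List.pyGetD ((List.range (n.toNat + 1)).map (pvP secret)) (i + 1) 0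
            - PySem.List.pyGetD ((List.range (n.toNat + 1)).map (pvP secret)) i 0)
        ∘ (fun (k : Nat) => (k : Int)))
      = (fun (k : Nat) =>
          PySem.List.pyGetD ((List.range (n.toNat + 1)).map (pvP secret)) ((k : Int) + 1) 0
          - PySem.List.pyGetD ((List.range (n.toNat + 1)).map (pvP secret)) (k : Int) 0) from rfl,
      pv_deltas_eq]
  have hlen2 : ((((List.range n.toNat).map (pvD secret)).length : Int) - 3).toNat = n.toNat - 3 := by
    simp; omega
  rw [PySem.List.pyRange_one 0 _]
  simp only [zero_add, Int.sub_zero]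
  rw [hlen2, List.foldl_map]
  rw [pv_B_fold]
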